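-- pv_equiv track=rewrite | github.com/Kabir1240/FIT3155 | Assignment_1/30032067/q1/stricterBM.py | get_ebc_array
-- ===== SOURCE A (Python) =====
-- def get_ebc_array(pat: str):
--     """
--     given pattern, calculates the extended bad character rule array
--
--     Args:
--         pat: the pattern
--
--     Returns: a list of lists that can be used to find bad characters
--
--     """
--
--     m = len(pat)
--     bc_array = [[0]*93 for _ in range(m)]                # 93 printable characters in ASCII, 33-126
--     for i in range(m):
--         for j in range(0, i):
--             current = ord(pat[j]) - 33                   # first position starts at 33
--             bc_array[i][current] = j + 1
--
--     return bc_array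
-- ===== SOURCE B (Python) =====
-- def get_ebc_array(pat: str):
--     if not pat:
--         return []
--     rows = [[0] * 93]
--     for i, c in enumerate(pat[:-1]):
--         row = rows[-1].copy()
--         row[ord(c) - 33] = i + 1
--         rows.append(row)
--     return rows
-- ===== Notes on version B (the rewrite author's own statement) =====
-- stated objective: faster
-- what changed: Instead of re-scanning the whole prefix pat[0:i] for every row i, B builds each row incrementally as a copy of the previous row with a single update at ord(pat[i-1])-33.
import Mathlib
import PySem

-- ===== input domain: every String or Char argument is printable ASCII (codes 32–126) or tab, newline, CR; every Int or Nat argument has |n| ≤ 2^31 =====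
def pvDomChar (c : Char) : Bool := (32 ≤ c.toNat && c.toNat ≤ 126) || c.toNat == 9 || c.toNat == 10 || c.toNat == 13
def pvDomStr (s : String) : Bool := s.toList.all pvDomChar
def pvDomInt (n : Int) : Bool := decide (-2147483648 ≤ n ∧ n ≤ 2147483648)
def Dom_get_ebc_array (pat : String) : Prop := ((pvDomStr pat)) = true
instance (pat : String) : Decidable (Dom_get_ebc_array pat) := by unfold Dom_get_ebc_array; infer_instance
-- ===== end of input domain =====

-- B replaces A's quadratic prefix re-scan per row by an incremental build (each row =
-- previous row copied with one update), an asymptotic speed-up; return values proved equal on Pre_.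

-- ===== PORT A =====
-- In A, bc_array[i] is written only during outer iteration i, so the 2D mutation is
-- ported row-wise: the outer loop maps i to its row, the inner loop is the same fold
-- over j in range(i) performing the same assignment bc_array[i][ord(pat[j])-33] = j+1
-- (pySetD: exact under Pre_; outside Pre_ Python raises IndexError at that assignment).
def get_ebc_array (pat : String) : List (List Int) :=
  let cs := pat.toList
  let m := cs.length
  (List.range m).map (fun i =>
    (List.range i).foldl (fun row j =>
      let current : Int := ((cs.getD j ' ').toNat : Int) - 33
      PySem.List.pySetD row current ((j : Int) + 1))
      (List.replicate 93 (0 : Int)))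

-- ===== PORT B =====
-- rows starts as [[0]*93]; for each (i, c) in enumerate(pat[:-1]) append a copy of the
-- last row with row[ord(c)-33] = i+1 (same pySetD semantics as in A's port).
def get_ebc_array_alt (pat : String) : List (List Int) :=
  let cs := pat.toList
  if cs.isEmpty then []
  else
    (PySem.List.enumerate cs.dropLast).foldl (fun rows ic =>
      rows ++ [PySem.List.pySetD (rows.getLastD []) ((ic.2.toNat : Int) - 33) (ic.1 + 1)])
      [List.replicate 93 (0 : Int)]

-- ===== PRECONDITION & SPEC =====
-- Pre_ excludes exactly the inputs where Python A raises IndexError: a '~' (ord 126,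
-- index 126-33 = 93 = out of range for a 93-slot row) anywhere before the last
-- character.  B raises IndexError on exactly the same inputs.
def Pre_get_ebc_array (pat : String) : Prop := '~' ∉ pat.toList.dropLast
instance (pat : String) : Decidable (Pre_get_ebc_array pat) := by unfold Pre_get_ebc_array; infer_instance
def pvWitness_get_ebc_array : String := "acbab"

def Spec_get_ebc_array (pat : String) (out : List (List Int)) : Prop := out = get_ebc_array_alt pat
instance (pat : String) (out : List (List Int)) : Decidable (Spec_get_ebc_array pat out) := by unfold Spec_get_ebc_array; infer_instance

-- ===== CLAIM (what is proved, stated in full; the proofs are below) =====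
def Claim_equal_get_ebc_array : Prop := ∀ (pat : String), Dom_get_ebc_array pat → Pre_get_ebc_array pat → Spec_get_ebc_array pat (get_ebc_array pat)

-- ===== LEMMAS AND PROOFS =====

-- the row-building step shared (after the proofs below) by both ports
def pvStep (cs : List Char) (row : List Int) (j : Nat) : List Int :=
  PySem.List.pySetD row (((cs.getD j ' ').toNat : Int) - 33) ((j : Int) + 1)

-- row i of A's table
def pvRowA (cs : List Char) (i : Nat) : List Int :=
  (List.range i).foldl (pvStep cs) (List.replicate 93 (0 : Int))

lemma pvRowA_succ (cs : List Char) (i : Nat) :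
    pvRowA cs (i + 1) = pvStep cs (pvRowA cs i) i := by
  simp [pvRowA, List.range_succ]

-- B's fold over the first k characters produces A's rows 0..k
lemma pvFold_take (cs : List Char) (k : Nat) (hk : k < cs.length) :
    (PySem.List.enumerate (cs.take k)).foldl (fun rows ic =>
        rows ++ [PySem.List.pySetD (rows.getLastD []) ((ic.2.toNat : Int) - 33) (ic.1 + 1)])
        [List.replicate 93 (0 : Int)]
    = (List.range (k + 1)).map (pvRowA cs) := by
  induction k with
  | zero => simp [pvRowA]
  | succ k ih =>
    have hk' : k < cs.length := Nat.lt_of_succ_lt hk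
    have htake : cs.take (k + 1) = cs.take k ++ [cs[k]] := by
      rw [List.take_add_one]
      simp [List.getElem?_eq_getElem hk']
    rw [htake, PySem.List.enumerate_append, List.foldl_append, ih hk']
    have hlen : (cs.take k).length = k := List.length_take_of_le (Nat.le_of_lt hk')
    simp only [PySem.List.enumerate, hlen]
    rw [List.range_succ (n := k + 1), List.map_append]
    simp [List.foldl, pvRowA_succ, pvStep, List.getD_eq_getElem?_getD,
      List.getElem?_eq_getElem hk', List.getLast?_range]

-- ===== VERDICT (by name: the statement is the Claim_ definition above) =====
theorem get_ebc_array_spec : Claim_equal_get_ebc_array := by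
  intro pat _ _
  unfold Spec_get_ebc_array get_ebc_array get_ebc_array_alt
  by_cases h : pat.toList.isEmpty
  · simp_all [List.isEmpty_iff]
  · have hne : pat.toList ≠ [] := by simpa [List.isEmpty_iff] using h
    have hlen : 0 < pat.toList.length := List.length_pos_of_ne_nil hne
    simp only [h, Bool.false_eq_true, ite_false]
    rw [List.dropLast_eq_take, pvFold_take pat.toList (pat.toList.length - 1) (by omega)]
    have : pat.toList.length - 1 + 1 = pat.toList.length := by omega
    rw [this]
    rfl
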